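-- pv_equiv track=rewrite | github.com/xliry/desloppify | desloppify/languages/dart/extractors.py | _find_statement_end
-- ===== SOURCE A (Python) =====
-- def _find_statement_end(content: str, start_pos: int) -> int | None:
--     in_string: str | None = None
--     escape = False
--     for i in range(start_pos, len(content)):
--         ch = content[i]
--         if in_string:
--             if escape:
--                 escape = False
--                 continue
--             if ch == "\\":
--                 escape = True
--                 continue
--             if ch == in_string:
--                 in_string = None
--             continue
--         if ch in {'"', "'"}:
--             in_string = ch
--             continue
--         if ch == ";":
--             return i
--     return None
-- ===== SOURCE B (Python) =====
-- def _find_statement_end(content: str, start_pos: int) -> int | None: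
--     n = len(content)
--     i = start_pos
--     while i < n:
--         ch = content[i]
--         if ch == ";":
--             return i
--         if ch in ('"', "'"):
--             quote = ch
--             i += 1
--             # swallow the whole string literal with an inner loop
--             while i < n:
--                 c = content[i]
--                 if c == "\\":
--                     i += 2  # skip the escaped character
--                 elif c == quote:
--                     break
--                 else:
--                     i += 1
--         i += 1
--     return None
-- ===== Notes on version B (the rewrite author's own statement) =====
-- stated objective: alternative
-- what changed: Replaces the cross-iteration in_string/escape flag state machine with a two-level index scan: an inner while loop swallows each string literal (jumping two positions past a backslash), so the outer loop only ever looks at code outside strings.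
import Mathlib
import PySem

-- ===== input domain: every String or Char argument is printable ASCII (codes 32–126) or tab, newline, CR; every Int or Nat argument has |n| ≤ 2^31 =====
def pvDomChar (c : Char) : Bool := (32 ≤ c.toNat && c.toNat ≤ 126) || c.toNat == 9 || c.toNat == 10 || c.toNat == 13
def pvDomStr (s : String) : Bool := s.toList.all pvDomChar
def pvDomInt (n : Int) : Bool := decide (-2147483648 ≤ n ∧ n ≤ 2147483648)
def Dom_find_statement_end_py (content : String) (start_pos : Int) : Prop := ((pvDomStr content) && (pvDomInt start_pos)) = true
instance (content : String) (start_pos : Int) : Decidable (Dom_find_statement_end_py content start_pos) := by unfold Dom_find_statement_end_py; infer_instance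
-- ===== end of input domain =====

-- B replaces A's cross-iteration in_string/escape flag state machine by a two-level
-- index scan whose inner loop swallows each string literal (objective: alternative).

-- ===== PORT A =====
-- A's for-loop over range(start_pos, len(content)) with state (in_string, escape);
-- `none` from pyGet? is Python's IndexError (excluded by Pre_), ported as returning none.
def findA_go (content : List Char) : List Int → Option Char → Bool → Option Int
  | [], _, _ => none
  | i :: rest, inStr, esc =>
    match PySem.List.pyGet? content i with
    | none => none
    | some ch =>
      match inStr with
      | some q =>
        if esc then findA_go content rest (some q) false
        else if ch = '\\' then findA_go content rest (some q) true
        else if ch = q then findA_go content rest none false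
        else findA_go content rest (some q) false
      | none =>
        if ch = '"' ∨ ch = '\'' then findA_go content rest (some ch) false
        else if ch = ';' then some i
        else findA_go content rest none false

def find_statement_end_py (content : String) (start_pos : Int) : Option Int :=
  findA_go content.toList (PySem.List.pyRange start_pos (content.toList.length : Int) 1) none false

-- ===== PORT B =====
-- inner while loop: consume the body of a string literal opened with quote q, jumping 2 past
-- a backslash; returns the index where the loop stops (the closing quote, or ≥ n at end).
-- Fuel bounds the iteration count only (each step advances i by ≥ 1, so fuel (n-i).toNat is
-- exact: fuel 0 can only be reached with i ≥ n, where the while-guard stops the loop anyway).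
def altInner (content : List Char) (n : Int) (q : Char) : Nat → Int → Int
  | 0, i => i
  | g + 1, i =>
    if i < n then
      match PySem.List.pyGet? content i with
      | none => i  -- IndexError in Python; excluded by Pre_
      | some c =>
        if c = '\\' then altInner content n q g (i + 2)
        else if c = q then i
        else altInner content n q g (i + 1)
    else i

-- outer while loop: scan code outside string literals for ';' (same fuel discipline)
def altOuter (content : List Char) (n : Int) : Nat → Int → Option Int
  | 0, _ => none
  | f + 1, i =>
    if i < n then
      match PySem.List.pyGet? content i with
      | none => none  -- IndexError in Python; excluded by Pre_
      | some ch =>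
        if ch = ';' then some i
        else if ch = '"' ∨ ch = '\'' then
          altOuter content n f (altInner content n ch ((n - (i + 1)).toNat) (i + 1) + 1)
        else altOuter content n f (i + 1)
    else none

def find_statement_end_py_alt (content : String) (start_pos : Int) : Option Int :=
  altOuter content.toList (content.toList.length : Int)
    (((content.toList.length : Int) - start_pos).toNat) start_pos

-- ===== PRECONDITION & SPEC =====
-- Pre_ excludes exactly the inputs where Python A raises IndexError
-- (start_pos below -len(content), so content[start_pos] is out of range); B raises there too.
def Pre_find_statement_end_py (content : String) (start_pos : Int) : Prop :=
  -(content.toList.length : Int) ≤ start_pos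
instance (content : String) (start_pos : Int) : Decidable (Pre_find_statement_end_py content start_pos) := by unfold Pre_find_statement_end_py; infer_instance

def pvWitness_find_statement_end_py : String × Int := ("let x = 'a;\\'b'; y;", 0)

def Spec_find_statement_end_py (content : String) (start_pos : Int) (out : Option Int) : Prop := out = find_statement_end_py_alt content start_pos
instance (content : String) (start_pos : Int) (out : Option Int) : Decidable (Spec_find_statement_end_py content start_pos out) := by unfold Spec_find_statement_end_py; infer_instance

-- ===== CLAIM (what is proved, stated in full; the proofs are below) =====
def Claim_equal_find_statement_end_py : Prop := ∀ (content : String) (start_pos : Int), Dom_find_statement_end_py content start_pos → Pre_find_statement_end_py content start_pos → Spec_find_statement_end_py content start_pos (find_statement_end_py content start_pos)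

-- ===== LEMMAS AND PROOFS =====

theorem pyGet?_exists (cs : List Char) (i : Int) (h1 : -(cs.length : Int) ≤ i)
    (h2 : i < (cs.length : Int)) : ∃ c, PySem.List.pyGet? cs i = some c := by
  cases hg : PySem.List.pyGet? cs i with
  | none =>
    have := (PySem.List.pyGet?_eq_none_iff cs i).mp hg
    unfold PySem.Raise.InRange at this
    omega
  | some c => exact ⟨c, rfl⟩

theorem altInner_stop (cs : List Char) (n : Int) (q : Char) (g : Nat) (i : Int)
    (h : ¬ i < n) : altInner cs n q g i = i := by
  cases g <;> simp [altInner, h]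

theorem altOuter_stop (cs : List Char) (n : Int) (f : Nat) (i : Int)
    (h : ¬ i < n) : altOuter cs n f i = none := by
  cases f <;> simp [altOuter, h]

theorem altInner_step (cs : List Char) (n : Int) (q : Char) (g : Nat) (i : Int) (ch : Char)
    (hi : i < n) (hg : PySem.List.pyGet? cs i = some ch) :
    altInner cs n q (g + 1) i = if ch = '\\' then altInner cs n q g (i + 2)
      else if ch = q then i else altInner cs n q g (i + 1) := by
  simp [altInner, hi, hg]

theorem altOuter_step (cs : List Char) (n : Int) (f : Nat) (i : Int) (ch : Char)
    (hi : i < n) (hg : PySem.List.pyGet? cs i = some ch) :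
    altOuter cs n (f + 1) i = if ch = ';' then some i
      else if ch = '"' ∨ ch = '\'' then
        altOuter cs n f (altInner cs n ch ((n - (i + 1)).toNat) (i + 1) + 1)
      else altOuter cs n f (i + 1) := by
  simp [altOuter, hi, hg]

-- state correspondence, by fuel induction on the number of remaining indices:
-- A at index i outside a string  ↔  B's outer loop at i;
-- A at i inside string q, no pending escape  ↔  B's inner loop at i, then outer after the close;
-- A at i inside string q, pending escape  ↔  B's inner loop already jumped to i+1.
theorem state_corr (cs : List Char) (k : Nat) :
    ∀ i : Int, ((cs.length : Int) - i).toNat ≤ k → -(cs.length : Int) ≤ i →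
      (∀ f, ((cs.length : Int) - i).toNat ≤ f →
        findA_go cs (PySem.List.pyRange i (cs.length : Int) 1) none false
          = altOuter cs (cs.length : Int) f i) ∧
      (∀ q f g, ((cs.length : Int) - i).toNat ≤ g → ((cs.length : Int) - i).toNat ≤ f + 1 →
        findA_go cs (PySem.List.pyRange i (cs.length : Int) 1) (some q) false
          = altOuter cs (cs.length : Int) f (altInner cs (cs.length : Int) q g i + 1)) ∧
      (∀ q f g, ((cs.length : Int) - (i + 1)).toNat ≤ g → ((cs.length : Int) - i).toNat ≤ f + 1 →
        findA_go cs (PySem.List.pyRange i (cs.length : Int) 1) (some q) true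
          = altOuter cs (cs.length : Int) f (altInner cs (cs.length : Int) q g (i + 1) + 1)) := by
  induction k with
  | zero =>
    intro i hk _
    have hni : ¬ i < (cs.length : Int) := by omega
    rw [PySem.List.pyRange_one_eq_nil (by omega)]
    refine ⟨fun f _ => ?_, fun q f g _ _ => ?_, fun q f g _ _ => ?_⟩
    · rw [altOuter_stop cs _ f i hni]; rfl
    · rw [altInner_stop cs _ q g i hni, altOuter_stop cs _ f (i + 1) (by omega)]; rfl
    · rw [altInner_stop cs _ q g (i + 1) (by omega),
        altOuter_stop cs _ f (i + 1 + 1) (by omega)]; rfl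
  | succ m ih =>
    intro i hk hge
    by_cases hi : i < (cs.length : Int)
    · obtain ⟨ch, hg⟩ := pyGet?_exists cs i hge hi
      rw [PySem.List.pyRange_one_cons hi]
      have IH := ih (i + 1) (by omega) (by omega)
      refine ⟨fun f hf => ?_, fun q f g hgf hff => ?_, fun q f g hgf hff => ?_⟩
      · -- outside a string
        obtain ⟨f', rfl⟩ : ∃ f', f = f' + 1 := ⟨f - 1, by omega⟩
        simp only [findA_go, hg]
        rw [altOuter_step cs _ f' i ch hi hg]
        by_cases hq : ch = '"' ∨ ch = '\''
        · have hns : ¬ ch = ';' := by rcases hq with h | h <;> simp [h]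
          rw [if_pos hq, if_neg hns, if_pos hq]
          exact IH.2.1 ch f' _ (le_refl _) (by omega)
        · rw [if_neg hq]
          by_cases hs : ch = ';'
          · rw [if_pos hs, if_pos hs]
          · rw [if_neg hs, if_neg hs, if_neg hq]
            exact IH.1 f' (by omega)
      · -- inside string q, no pending escape
        obtain ⟨g', rfl⟩ : ∃ g', g = g' + 1 := ⟨g - 1, by omega⟩
        simp only [findA_go, hg, Bool.false_eq_true, if_false]
        rw [altInner_step cs _ q g' i ch hi hg]
        split_ifs with hb hq
        · have := IH.2.2 q f g' (by omega) (by omega)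
          rw [show i + 1 + 1 = i + 2 by ring] at this
          exact this
        · exact IH.1 f (by omega)
        · exact IH.2.1 q f g' (by omega) (by omega)
      · -- inside string q, pending escape: A consumes content[i] unconditionally
        simp only [findA_go, hg, if_true]
        exact IH.2.1 q f g hgf (by omega)
    · have hni := hi
      rw [PySem.List.pyRange_one_eq_nil (by omega)]
      refine ⟨fun f _ => ?_, fun q f g _ _ => ?_, fun q f g _ _ => ?_⟩
      · rw [altOuter_stop cs _ f i hni]; rfl
      · rw [altInner_stop cs _ q g i hni, altOuter_stop cs _ f (i + 1) (by omega)]; rfl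
      · rw [altInner_stop cs _ q g (i + 1) (by omega),
          altOuter_stop cs _ f (i + 1 + 1) (by omega)]; rfl

-- ===== VERDICT (by name: the statement is the Claim_ definition above) =====
theorem find_statement_end_py_spec : Claim_equal_find_statement_end_py := by
  intro content start_pos _ hpre
  unfold Spec_find_statement_end_py find_statement_end_py find_statement_end_py_alt
  exact (state_corr content.toList ((content.toList.length : Int) - start_pos).toNat
    start_pos (le_refl _) hpre).1 _ (le_refl _)
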